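-- pv_equiv track=rewrite | github.com/suavecitoprograms/Programming-Projects-and-Courses | MOOC spring 2024 Data Structures and Algorithms/Week 3/samechar.py | count
-- ===== SOURCE A (Python) =====
-- def count(s):
--     #model solution approach
--     n = len(s)
--     count = 0
--     total = 0
--     for i in range(n):
--         if s[i] != s[i-1]:
--             count = 0
--         count += 1
--         total += count
--     return  total
-- ===== SOURCE B (Python) =====
-- def count(s):
--     # Sum, over each maximal run of identical characters of length L,
--     # the triangular number L*(L+1)//2 (number of same-char substrings in the run).
--     total = 0
--     i = 0
--     n = len(s)
--     while i < n:
--         j = i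
--         while j < n and s[j] == s[i]:
--             j += 1
--         L = j - i
--         total += L * (L + 1) // 2
--         i = j
--     return total
-- ===== Notes on version B (the rewrite author's own statement) =====
-- stated objective: alternative
-- what changed: B scans maximal runs of equal characters and adds the closed-form triangular number L*(L+1)//2 per run, instead of A's per-character counter/total accumulation over indices (with its s[i-1] wraparound).
import Mathlib
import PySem

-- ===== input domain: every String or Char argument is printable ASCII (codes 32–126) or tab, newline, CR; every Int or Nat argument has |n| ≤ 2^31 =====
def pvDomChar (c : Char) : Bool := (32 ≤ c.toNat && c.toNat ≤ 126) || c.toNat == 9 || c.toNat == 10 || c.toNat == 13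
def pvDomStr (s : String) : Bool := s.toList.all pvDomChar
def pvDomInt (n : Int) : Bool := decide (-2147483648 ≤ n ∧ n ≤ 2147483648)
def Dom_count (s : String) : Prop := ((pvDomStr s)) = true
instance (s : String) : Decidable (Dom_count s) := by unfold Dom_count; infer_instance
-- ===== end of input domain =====

-- B replaces A's per-character counter accumulation by a run-scan adding the
-- triangular number L*(L+1)//2 per maximal run of equal characters (alternative, same O(n) cost).


-- ===== PORT A =====
-- for i in range(n): if s[i] != s[i-1]: count = 0;  count += 1;  total += count
def count (s : String) : Int :=
  let n : Int := PySem.Str.len s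
  let res :=
    (PySem.List.pyRange 0 n 1).foldl
      (fun (st : Int × Int) i =>
        let c := if PySem.Str.pyGet? s i ≠ PySem.Str.pyGet? s (i - 1) then (0 : Int) else st.1
        let c := c + 1
        (c, st.2 + c))
      ((0 : Int), (0 : Int))
  res.2

-- ===== PORT B =====
-- inner while loop of Source B: consume the maximal run of the head character,
-- add L*(L+1)//2, continue on the rest (port of the two-pointer run scan)
def countAltGo : List Char → Int
  | [] => 0
  | c :: cs =>
      let L : Int := 1 + ((cs.takeWhile (· == c)).length : Int)
      PySem.Int.floordiv (L * (L + 1)) 2 + countAltGo (cs.dropWhile (· == c))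
termination_by l => l.length
decreasing_by
  exact Nat.lt_succ_of_le (List.length_dropWhile_le _ _)

def count_alt (s : String) : Int := countAltGo s.toList

-- ===== PRECONDITION & SPEC =====
def Spec_count (s : String) (out : Int) : Prop := out = count_alt s
instance (s : String) (out : Int) : Decidable (Spec_count s out) := by unfold Spec_count; infer_instance

-- ===== CLAIM (what is proved, stated in full; the proofs are below) =====
def Claim_equal_count : Prop := ∀ (s : String), Dom_count s → Spec_count s (count s)

-- ===== LEMMAS AND PROOFS =====

-- A's loop body rewritten as structural recursion over the remaining characters,
-- carrying the previous character (proof-side model of A's fold)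
def fA : List Char → Option Char → Int × Int → Int × Int
  | [], _, st => st
  | c :: cs, prev, st =>
      let cnt := if some c ≠ prev then (0 : Int) else st.1
      fA cs (some c) (cnt + 1, st.2 + (cnt + 1))

-- triangular number
def T (x : Int) : Int := x * (x + 1) / 2

lemma T_succ (x : Int) : T (x + 1) = T x + (x + 1) := by
  unfold T
  have h : (x + 1) * (x + 1 + 1) = x * (x + 1) + (x + 1) * 2 := by ring
  rw [h, Int.add_mul_ediv_right _ _ (by norm_num : (2:Int) ≠ 0)]

lemma T_one : T 1 = 1 := by decide

-- the fold over pyRange i n 1 (i ≥ 1) is fA on the dropped suffix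
lemma bridge (s : String) (i : Nat) (h1 : 1 ≤ i) (h2 : i ≤ s.toList.length)
    (st : Int × Int) :
    (PySem.List.pyRange (i : Int) (s.toList.length : Int) 1).foldl
      (fun (st : Int × Int) j =>
        let c := if PySem.Str.pyGet? s j ≠ PySem.Str.pyGet? s (j - 1) then (0 : Int) else st.1
        let c := c + 1
        (c, st.2 + c))
      st
      = fA (s.toList.drop i) (some (s.toList.getD (i - 1) ' ')) st := by
  induction hn : s.toList.length - i generalizing i st with
  | zero =>
    have hi : i = s.toList.length := by omega
    subst hi
    rw [PySem.List.pyRange_one_eq_nil (by omega), List.drop_length]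
    rfl
  | succ k ih =>
    have hlt : i < s.toList.length := by omega
    rw [PySem.List.pyRange_one_cons (by exact_mod_cast hlt)]
    rw [List.foldl_cons]
    have hget : PySem.Str.pyGet? s (i : Int) = some (s.toList[i]) := by
      simp [List.getElem?_eq_getElem hlt]
    have hcast : ((i : Int) - 1) = ((i - 1 : Nat) : Int) := by omega
    have hprev : PySem.Str.pyGet? s ((i : Int) - 1) = some (s.toList[i-1]) := by
      rw [hcast]
      simp [List.getElem?_eq_getElem (by omega : i - 1 < s.toList.length)]
    have hdrop : s.toList.drop i = s.toList[i] :: s.toList.drop (i + 1) :=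
      (List.getElem_cons_drop hlt).symm
    have hstep : ((i : Int) + 1) = ((i + 1 : Nat) : Int) := by omega
    rw [hget, hprev, hdrop, hstep, ih (i + 1) (by omega) (by omega) _ (by omega)]
    have hgd : s.toList.getD (i - 1) ' ' = s.toList[i-1] :=
      List.getD_eq_getElem _ _ (by omega)
    have hgd2 : s.toList.getD (i + 1 - 1) ' ' = s.toList[i] := by
      have : i + 1 - 1 = i := by omega
      rw [this]; exact List.getD_eq_getElem _ _ hlt
    rw [hgd, hgd2]
    simp only [fA, Option.some.injEq, ne_eq]

-- fA starting inside a run equals the closed-form triangular increment plus B on the rest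
lemma runA (cs : List Char) (c : Char) (cnt tot : Int) :
    (fA cs (some c) (cnt, tot)).2
      = tot + (T (cnt + ((cs.takeWhile (· == c)).length : Int)) - T cnt)
        + countAltGo (cs.dropWhile (· == c)) := by
  induction cs generalizing c cnt tot with
  | nil => simp [fA, countAltGo]
  | cons c' cs' ih =>
    by_cases hc : c' = c
    · subst hc
      have : fA (c' :: cs') (some c') (cnt, tot)
          = fA cs' (some c') (cnt + 1, tot + (cnt + 1)) := by
        simp [fA]
      rw [this, ih c' (cnt + 1) (tot + (cnt + 1))]
      simp only [List.takeWhile_cons, beq_self_eq_true, if_true, List.dropWhile_cons,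
        List.length_cons]
      have e1 : (((cs'.takeWhile (· == c')).length + 1 : Nat) : Int)
          = ((cs'.takeWhile (· == c')).length : Int) + 1 := Nat.cast_add_one _
      rw [e1, show cnt + (((cs'.takeWhile (· == c')).length : Int) + 1)
          = (cnt + 1) + ((cs'.takeWhile (· == c')).length : Int) from by ring, T_succ cnt]
      ring
    · have hne : (c' == c) = false := beq_false_of_ne hc
      have : fA (c' :: cs') (some c) (cnt, tot)
          = fA cs' (some c') (1, tot + 1) := by
        simp [fA, hc]
      rw [this, ih c' 1 (tot + 1)]
      simp only [List.takeWhile_cons, hne, List.dropWhile_cons]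
      rw [T_one]
      show tot + 1 + (T (1 + ↑(cs'.takeWhile (· == c')).length) - 1)
            + countAltGo (cs'.dropWhile (· == c'))
          = tot + (T (cnt + ↑(0:Nat)) - T cnt) + countAltGo (c' :: cs')
      rw [countAltGo]
      have hpos : (0 : Int) < 2 := by norm_num
      rw [PySem.Int.floordiv_eq_ediv_of_pos hpos]
      show tot + 1 + (T (1 + ↑(cs'.takeWhile (· == c')).length) - 1)
            + countAltGo (cs'.dropWhile (· == c'))
          = tot + (T (cnt + ↑(0:Nat)) - T cnt)
            + ((1 + ↑(cs'.takeWhile (· == c')).length) * (1 + ↑(cs'.takeWhile (· == c')).length + 1) / 2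
               + countAltGo (cs'.dropWhile (· == c')))
      unfold T
      push_cast
      ring

-- ===== VERDICT (by name: the statement is the Claim_ definition above) =====
theorem count_spec : Claim_equal_count := by
  intro s _
  unfold Spec_count count count_alt
  simp only [PySem.Str.len_eq]
  by_cases hnil : s.toList = []
  · rw [hnil]
    simp [PySem.List.pyRange_one_eq_nil, countAltGo]
  · obtain ⟨c0, rest, hl⟩ := List.exists_cons_of_ne_nil hnil
    have hpos : (0 : Int) < (s.toList.length : Int) := by rw [hl]; simp
    have hlen : 1 ≤ s.toList.length := by rw [hl]; simp
    rw [PySem.List.pyRange_one_cons hpos, List.foldl_cons]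
    have hif : (if PySem.Str.pyGet? s 0 ≠ PySem.Str.pyGet? s (0 - 1)
        then (0 : Int) else (((0 : Int), (0 : Int))).1) = 0 := by
      split <;> rfl
    rw [hif]
    have e0 : ((0 : Int) + 1) = ((1 : Nat) : Int) := by norm_num
    rw [e0, bridge s 1 (le_refl 1) hlen]
    have hd1 : s.toList.drop 1 = rest := by rw [hl]; rfl
    have hg0 : s.toList.getD (1 - 1) ' ' = c0 := by rw [hl]; rfl
    have est : ((((1 : Nat) : Int)), ((0 : Int), (0 : Int)).2 + ((1 : Nat) : Int))
        = ((1 : Int), (1 : Int)) := by norm_num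
    rw [hd1, hg0, est, runA rest c0 1 1, hl, countAltGo]
    rw [PySem.Int.floordiv_eq_ediv_of_pos (by norm_num : (0:Int) < 2)]
    unfold T
    push_cast
    ring
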